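-- pv_equiv track=rewrite | github.com/tib-dev/medical-telegram-warehouse | src/medi_tg_analytics/enrichment/yolo_detect.py | classify_image
-- ===== SOURCE A (Python) =====
-- from typing import List, Dict
--
-- PERSON_CLASSES = {"person"}
--
-- PRODUCT_CLASSES = {"bottle", "cup", "bowl", "jar"}
--
-- def classify_image(detected_classes: List[str]) -> str:
--     has_person = any(cls in PERSON_CLASSES for cls in detected_classes)
--     has_product = any(cls in PRODUCT_CLASSES for cls in detected_classes)
--
--     if has_person and has_product:
--         return "promotional"
--     if has_product and not has_person:
--         return "product_display"
--     if has_person and not has_product: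
--         return "lifestyle"
--     return "other"
-- ===== SOURCE B (Python) =====
-- PERSON_CLASSES = {"person"}
--
-- PRODUCT_CLASSES = {"bottle", "cup", "bowl", "jar"}
--
-- LABELS = {
--     (True, True): "promotional",
--     (True, False): "lifestyle",
--     (False, True): "product_display",
--     (False, False): "other",
-- }
--
-- def classify_image(detected_classes):
--     has_person = False
--     has_product = False
--     for cls in detected_classes:
--         if cls in PERSON_CLASSES:
--             has_person = True
--         elif cls in PRODUCT_CLASSES:
--             has_product = True
--         if has_person and has_product:
--             break
--     return LABELS[(has_person, has_product)]
-- ===== Notes on version B (the rewrite author's own statement) =====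
-- stated objective: alternative
-- what changed: Replaced the two separate any() scans and the four-way if-chain with a single early-terminating traversal maintaining both flags, followed by a table lookup on the flag pair.
import Mathlib
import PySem

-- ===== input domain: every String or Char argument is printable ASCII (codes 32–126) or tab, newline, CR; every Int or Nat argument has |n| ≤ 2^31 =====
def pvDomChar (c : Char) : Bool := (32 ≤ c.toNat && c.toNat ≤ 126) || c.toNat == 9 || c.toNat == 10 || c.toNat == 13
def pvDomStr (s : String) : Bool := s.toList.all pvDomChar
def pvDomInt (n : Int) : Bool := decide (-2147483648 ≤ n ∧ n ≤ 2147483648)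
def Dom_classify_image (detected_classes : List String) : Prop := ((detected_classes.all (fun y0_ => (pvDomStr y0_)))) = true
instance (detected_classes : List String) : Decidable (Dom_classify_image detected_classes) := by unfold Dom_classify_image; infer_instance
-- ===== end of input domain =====

-- B replaces A's two any() scans + four-way if-chain by one early-terminating
-- traversal maintaining both flags, then a table lookup on the flag pair (alternative decomposition).

-- ===== PORT A =====
def pvPersonClasses : List String := ["person"]
def pvProductClasses : List String := ["bottle", "cup", "bowl", "jar"]

def classify_image (detected_classes : List String) : String :=
  let has_person := detected_classes.any (fun cls => pvPersonClasses.contains cls)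
  let has_product := detected_classes.any (fun cls => pvProductClasses.contains cls)
  if has_person && has_product then "promotional"
  else if has_product && !has_person then "product_display"
  else if has_person && !has_product then "lifestyle"
  else "other"

-- ===== PORT B =====
-- the for-loop of Source B with its early break; state = (has_person, has_product)
def pvScan : List String → Bool → Bool → Bool × Bool
  | [], p, q => (p, q)
  | cls :: rest, p, q =>
    let p' := if pvPersonClasses.contains cls then true else p
    let q' := if !(pvPersonClasses.contains cls) && pvProductClasses.contains cls then true else q
    if p' && q' then (p', q') else pvScan rest p' q'

-- the LABELS table of Source B
def pvLabels (pq : Bool × Bool) : String :=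
  match pq with
  | (true, true) => "promotional"
  | (true, false) => "lifestyle"
  | (false, true) => "product_display"
  | (false, false) => "other"

def classify_image_alt (detected_classes : List String) : String :=
  pvLabels (pvScan detected_classes false false)

-- ===== PRECONDITION & SPEC =====
def Spec_classify_image (detected_classes : List String) (out : String) : Prop := out = classify_image_alt detected_classes
instance (detected_classes : List String) (out : String) : Decidable (Spec_classify_image detected_classes out) := by unfold Spec_classify_image; infer_instance

-- ===== CLAIM (what is proved, stated in full; the proofs are below) =====
def Claim_equal_classify_image : Prop := ∀ (detected_classes : List String), Dom_classify_image detected_classes → Spec_classify_image detected_classes (classify_image detected_classes)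

-- ===== LEMMAS AND PROOFS =====

-- a product class is never the person class, so Source B's elif guard is redundant
theorem pvProduct_not_person (c : String) (h : pvPersonClasses.contains c = true) :
    pvProductClasses.contains c = false := by
  have hc : c = "person" := by simpa [pvPersonClasses] using h
  subst hc; decide

-- invariant of the early-breaking scan
theorem pvScan_eq (l : List String) (p q : Bool) :
    pvScan l p q = (p || l.any (fun c => pvPersonClasses.contains c),
                    q || l.any (fun c => pvProductClasses.contains c)) := by
  induction l generalizing p q with
  | nil => simp [pvScan]
  | cons c rest ih =>
    have hd := pvProduct_not_person c
    simp only [pvScan, List.any_cons]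
    cases ha : pvPersonClasses.contains c <;> cases hb : pvProductClasses.contains c <;>
      simp only [ha, hb] at hd ⊢
    · cases p <;> cases q <;> simp [ih]
    · cases p <;> simp [ih]
    · cases q <;> simp [ih]
    · simp at hd

-- ===== VERDICT (by name: the statement is the Claim_ definition above) =====
theorem classify_image_spec : Claim_equal_classify_image := by
  intro l _
  unfold Spec_classify_image classify_image classify_image_alt
  rw [pvScan_eq]
  cases hp : l.any (fun c => pvPersonClasses.contains c) <;>
    cases hq : l.any (fun c => pvProductClasses.contains c) <;>
      simp [pvLabels]
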